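-- pv_equiv track=rewrite | github.com/griffisc306/netCloudSlackAlert | lambda_function.py | summarize_records_by_alert
-- ===== SOURCE A (Python) =====
-- from collections import defaultdict
--
-- def summarize_records_by_alert(records):
--     grouped = defaultdict(lambda: {"count": 0, "devices": set()})
--
--     for record in records:
--         key = record.get("alert_name") or "Unknown"
--         grouped[key]["count"] += 1
--         device_identifier = record.get("device_mac") or record.get("device_name") or "Unknown"
--         grouped[key]["devices"].add(device_identifier)
--
--     rows = []
--     for alert_name in sorted(grouped):
--         summary = grouped[alert_name]
--         rows.append({
--             "alert_name": alert_name,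
--             "alert_count": str(summary["count"]),
--             "affected_devices": str(len(summary["devices"])),
--         })
--
--     return rows
-- ===== SOURCE B (Python) =====
-- def _key(record):
--     return record.get("alert_name") or "Unknown"
--
--
-- def _device(record):
--     return record.get("device_mac") or record.get("device_name") or "Unknown"
--
--
-- def summarize_records_by_alert(records):
--     records = list(records)
--     return [
--         {
--             "alert_name": k,
--             "alert_count": str(sum(1 for r in records if _key(r) == k)),
--             "affected_devices": str(len({_device(r) for r in records if _key(r) == k})),
--         }
--         for k in sorted({_key(r) for r in records})
--     ]
-- ===== Notes on version B (the rewrite author's own statement) =====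
-- stated objective: idiomatic
-- what changed: Replaces the single-pass defaultdict accumulation (mutable per-key count and device set, then sort the keys) with a declarative comprehension: compute the sorted set of distinct alert keys once, then for each key take one filtering pass over the records to count them and collect their distinct devices.
import Mathlib
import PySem

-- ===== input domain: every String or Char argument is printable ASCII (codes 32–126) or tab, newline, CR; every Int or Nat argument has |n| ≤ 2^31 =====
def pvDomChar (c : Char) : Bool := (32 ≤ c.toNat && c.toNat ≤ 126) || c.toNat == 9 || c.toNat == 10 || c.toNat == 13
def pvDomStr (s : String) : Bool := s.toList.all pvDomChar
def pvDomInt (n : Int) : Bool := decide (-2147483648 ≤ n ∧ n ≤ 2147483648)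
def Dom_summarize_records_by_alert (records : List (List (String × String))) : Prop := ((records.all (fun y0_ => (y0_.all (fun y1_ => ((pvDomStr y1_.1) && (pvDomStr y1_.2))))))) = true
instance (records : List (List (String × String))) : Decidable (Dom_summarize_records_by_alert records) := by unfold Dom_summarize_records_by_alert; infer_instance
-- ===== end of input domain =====

-- B replaces A's single-pass defaultdict accumulation with a declarative
-- sorted-distinct-keys + per-key filtering comprehension (idiomatic, not faster).

-- shared fallback helpers: `record.get(f)` and Python's `x or y` on Optional[str]
-- (None and "" are falsy); A inlines these expressions, Source B names them _key/_device
def pvRecGet (record : List (String × String)) (k : String) : Option String :=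
  PySem.Dict.get? (PySem.Dict.mk record) k

def pvOrStr (x : Option String) (y : String) : String :=
  match x with
  | some s => if s = "" then y else s
  | none => y

def pvKey (record : List (String × String)) : String :=
  pvOrStr (pvRecGet record "alert_name") "Unknown"

def pvDev (record : List (String × String)) : String :=
  pvOrStr (pvRecGet record "device_mac") (pvOrStr (pvRecGet record "device_name") "Unknown")

-- ===== PORT A =====
-- the two defaultdict mutations `grouped[key]["count"] += 1` and
-- `grouped[key]["devices"].add(dev)` are one `modify` of the pair value at `key`
def pvGroupA (records : List (List (String × String))) : PySem.Dict String (Int × PySem.Set String) :=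
  records.foldl (fun g record =>
    g.modify (pvKey record) (0, PySem.Set.empty)
      (fun s => (s.1 + 1, PySem.Set.add s.2 (pvDev record)))) PySem.Dict.empty

def summarize_records_by_alert (records : List (List (String × String))) : List (List (String × String)) :=
  (PySem.List.sorted (pvGroupA records).keys (fun x => x) false).map (fun alert_name =>
    [("alert_name", alert_name),
     ("alert_count", PySem.Int.toStr ((pvGroupA records).getD alert_name (0, PySem.Set.empty)).1),
     ("affected_devices", PySem.Int.toStr (PySem.Set.len ((pvGroupA records).getD alert_name (0, PySem.Set.empty)).2))])

-- ===== PORT B =====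
def summarize_records_by_alert_alt (records : List (List (String × String))) : List (List (String × String)) :=
  (PySem.List.sorted (PySem.Set.ofList (records.map pvKey)) (fun x => x) false).map (fun k =>
    [("alert_name", k),
     ("alert_count", PySem.Int.toStr ((records.filter (fun r => pvKey r == k)).length : Int)),
     ("affected_devices", PySem.Int.toStr
        (PySem.Set.len (PySem.Set.ofList ((records.filter (fun r => pvKey r == k)).map pvDev))))])

-- ===== PRECONDITION & SPEC =====
def Spec_summarize_records_by_alert (records : List (List (String × String))) (out : List (List (String × String))) : Prop := out = summarize_records_by_alert_alt records
instance (records : List (List (String × String))) (out : List (List (String × String))) : Decidable (Spec_summarize_records_by_alert records out) := by unfold Spec_summarize_records_by_alert; infer_instance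

-- ===== CLAIM (what is proved, stated in full; the proofs are below) =====
def Claim_equal_summarize_records_by_alert : Prop := ∀ (records : List (List (String × String))), Dom_summarize_records_by_alert records → Spec_summarize_records_by_alert records (summarize_records_by_alert records)

-- ===== LEMMAS AND PROOFS =====

-- A's accumulation loop, characterised: the entry at key k holds the number of
-- records whose key is k and the set of their devices, accumulated into d's entry.
theorem pv_foldA_getD (l : List (List (String × String)))
    (d : PySem.Dict String (Int × PySem.Set String)) (k : String) :
    (l.foldl (fun g record =>
        g.modify (pvKey record) (0, PySem.Set.empty)
          (fun s => (s.1 + 1, PySem.Set.add s.2 (pvDev record)))) d).getD k (0, PySem.Set.empty)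
    = ((d.getD k (0, PySem.Set.empty)).1 + (l.filter (fun r => pvKey r == k)).length,
       PySem.Set.update (d.getD k (0, PySem.Set.empty)).2
         ((l.filter (fun r => pvKey r == k)).map pvDev)) := by
  induction l generalizing d with
  | nil => simp [PySem.Set.update]
  | cons r t ih =>
    simp only [List.foldl_cons, ih, PySem.Dict.getD_modify, List.filter_cons]
    by_cases h : pvKey r = k
    · simp [h, PySem.Set.update]
      omega
    · simp [h, Ne.symm h, beq_iff_eq]

theorem summarize_spec_aux (records : List (List (String × String))) :
    summarize_records_by_alert records = summarize_records_by_alert_alt records := by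
  unfold summarize_records_by_alert summarize_records_by_alert_alt
  have hkeys : (pvGroupA records).keys = PySem.Set.ofList (records.map pvKey) := by
    unfold pvGroupA
    rw [PySem.Dict.keys_foldl_modify_key records pvKey (0, PySem.Set.empty)
         (fun _ record s => (s.1 + 1, PySem.Set.add s.2 (pvDev record))) PySem.Dict.empty]
    rw [PySem.Dict.keys_empty, PySem.Set.update_nil_left]
  rw [hkeys]
  apply List.map_congr_left
  intro k _
  unfold pvGroupA
  rw [pv_foldA_getD]
  simp [PySem.Dict.getD_empty, PySem.Set.update_nil_left]

-- ===== VERDICT (by name: the statement is the Claim_ definition above) =====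
theorem summarize_records_by_alert_spec : Claim_equal_summarize_records_by_alert := by
  intro records _
  exact summarize_spec_aux records
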